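-- pv_equiv track=rewrite | github.com/SoftwareGodfather/technical_intervew_questions | LongestSubSequence.py | FindCharInStringUsingMap
-- ===== SOURCE A (Python) =====
-- def FindCharInStringUsingMap(myChar, mapLocations, pos):
--     if(myChar not in mapLocations.keys()):
--         return -1
--     locList = mapLocations[myChar]
--     for singleLocation in locList:
--         if singleLocation >= pos:
--             return singleLocation
--     return -1
-- ===== SOURCE B (Python) =====
-- def FindCharInStringUsingMap(myChar, mapLocations, pos):
--     locList = mapLocations.get(myChar)
--     if locList is None:
--         return -1
--     lo, hi = 0, len(locList)
--     while lo < hi: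
--         mid = (lo + hi) // 2
--         if locList[mid] < pos:
--             lo = mid + 1
--         else:
--             hi = mid
--     return locList[lo] if lo < len(locList) else -1
-- ===== Notes on version B (the rewrite author's own statement) =====
-- stated objective: alternative
-- what changed: replaced A's linear scan of the location list with a binary search (bisect_left style) for the first location >= pos, valid because the looked-up location list is sorted ascending (stated in Pre_).
-- outside the precondition, e.g. on FindCharInStringUsingMap('a', {'a': [5, 1]}, 2): A returns 5, B returns -1
import Mathlib
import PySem

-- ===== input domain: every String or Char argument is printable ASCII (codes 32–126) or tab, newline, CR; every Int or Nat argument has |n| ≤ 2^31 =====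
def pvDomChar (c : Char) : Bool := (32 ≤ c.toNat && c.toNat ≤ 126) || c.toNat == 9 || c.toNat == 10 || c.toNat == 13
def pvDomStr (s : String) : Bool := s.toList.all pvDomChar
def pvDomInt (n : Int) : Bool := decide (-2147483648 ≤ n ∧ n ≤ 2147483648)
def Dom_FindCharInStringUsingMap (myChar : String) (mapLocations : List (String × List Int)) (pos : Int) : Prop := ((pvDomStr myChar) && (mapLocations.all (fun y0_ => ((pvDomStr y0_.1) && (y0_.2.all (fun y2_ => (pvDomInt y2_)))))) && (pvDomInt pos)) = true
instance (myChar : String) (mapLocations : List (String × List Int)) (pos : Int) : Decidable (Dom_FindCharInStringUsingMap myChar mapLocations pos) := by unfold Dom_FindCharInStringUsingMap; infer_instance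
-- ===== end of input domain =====

-- B replaces A's linear scan of the (sorted, per Pre_) location list by a binary search: an alternative algorithm for the same lookup.

-- ===== PORT A =====
-- the 'for singleLocation in locList: if singleLocation >= pos: return singleLocation' loop
def pvFirstGE : List Int → Int → Int
  | [], _ => -1
  | x :: xs, pos => if x ≥ pos then x else pvFirstGE xs pos

def FindCharInStringUsingMap (myChar : String) (mapLocations : List (String × List Int)) (pos : Int) : Int :=
  if ¬ (mapLocations.map Prod.fst).contains myChar then -1
  else
    match List.lookup myChar mapLocations with
    | none => -1
    | some locList => pvFirstGE locList pos

-- ===== PORT B =====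
-- the 'while lo < hi' binary-search loop of Source B
def pvBisect (l : List Int) (pos : Int) (lo hi : Nat) : Nat :=
  if h : lo < hi then
    let mid := (lo + hi) / 2
    if l.getD mid 0 < pos then pvBisect l pos (mid + 1) hi
    else pvBisect l pos lo mid
  else lo
termination_by hi - lo
decreasing_by all_goals omega

def FindCharInStringUsingMap_alt (myChar : String) (mapLocations : List (String × List Int)) (pos : Int) : Int :=
  match List.lookup myChar mapLocations with
  | none => -1
  | some locList =>
    let lo := pvBisect locList pos 0 locList.length
    if lo < locList.length then locList.getD lo 0 else -1

-- ===== PRECONDITION & SPEC =====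
-- Pre_ excludes inputs whose looked-up location list is not sorted ascending: binary search requires
-- sortedness, and on unsorted lists A's first-match-in-list-order value cannot be found by bisection.
def Pre_FindCharInStringUsingMap (myChar : String) (mapLocations : List (String × List Int)) (pos : Int) : Prop :=
  ((List.lookup myChar mapLocations).getD []).Pairwise (· ≤ ·)

instance (myChar : String) (mapLocations : List (String × List Int)) (pos : Int) : Decidable (Pre_FindCharInStringUsingMap myChar mapLocations pos) := by unfold Pre_FindCharInStringUsingMap; infer_instance

def pvWitness_FindCharInStringUsingMap : String × (List (String × List Int)) × Int :=
  ("a", [("a", [1, 3, 7]), ("b", [2])], 2)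

def Spec_FindCharInStringUsingMap (myChar : String) (mapLocations : List (String × List Int)) (pos : Int) (out : Int) : Prop := out = FindCharInStringUsingMap_alt myChar mapLocations pos
instance (myChar : String) (mapLocations : List (String × List Int)) (pos : Int) (out : Int) : Decidable (Spec_FindCharInStringUsingMap myChar mapLocations pos out) := by unfold Spec_FindCharInStringUsingMap; infer_instance

-- ===== CLAIM (what is proved, stated in full; the proofs are below) =====
def Claim_equal_FindCharInStringUsingMap : Prop := ∀ (myChar : String) (mapLocations : List (String × List Int)) (pos : Int), Dom_FindCharInStringUsingMap myChar mapLocations pos → Pre_FindCharInStringUsingMap myChar mapLocations pos → Spec_FindCharInStringUsingMap myChar mapLocations pos (FindCharInStringUsingMap myChar mapLocations pos)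

-- ===== LEMMAS AND PROOFS =====

-- keys-membership agrees with lookup success
lemma contains_keys_eq_lookup_isSome (myChar : String) :
    ∀ (m : List (String × List Int)),
      (m.map Prod.fst).contains myChar = (List.lookup myChar m).isSome := by
  intro m
  induction m with
  | nil => simp
  | cons p rest ih =>
    by_cases h : myChar = p.1
    · simp [List.lookup, h]
    · have h1 : ¬ (myChar == p.1) = true := by simpa using h
      have h2 : ¬ (p.1 == myChar) = true := by simpa using fun hc => h hc.symm
      simp only [List.map_cons, List.contains_cons, h1, Bool.false_or, List.lookup, h2,
        cond_false] at *
      exact ih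

-- sortedness in getD form
lemma sorted_getD {l : List Int} (hs : l.Pairwise (· ≤ ·)) :
    ∀ i j : Nat, i ≤ j → j < l.length → l.getD i 0 ≤ l.getD j 0 := by
  intro i j hij hj
  rcases Nat.eq_or_lt_of_le hij with rfl | hlt
  · exact le_refl _
  · rw [List.getD_eq_getElem l 0 (Nat.lt_trans hlt hj), List.getD_eq_getElem l 0 hj]
    exact List.pairwise_iff_getElem.mp hs i j _ _ hlt

-- the binary-search invariant
lemma pvBisect_inv (l : List Int) (pos : Int) (hs : l.Pairwise (· ≤ ·)) :
    ∀ (lo hi : Nat), lo ≤ hi → hi ≤ l.length →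
      (∀ k, k < lo → l.getD k 0 < pos) →
      (∀ k, hi ≤ k → k < l.length → pos ≤ l.getD k 0) →
      (pvBisect l pos lo hi ≤ l.length) ∧
      (∀ k, k < pvBisect l pos lo hi → l.getD k 0 < pos) ∧
      (∀ k, pvBisect l pos lo hi ≤ k → k < l.length → pos ≤ l.getD k 0) := by
  intro lo hi
  induction lo, hi using pvBisect.induct l pos with
  | case1 lo hi h mid hc ih =>
    intro hlh hhl hlo hhi
    rw [pvBisect]
    simp only [mid] at hc ih ⊢
    simp only [h, dif_pos, hc, if_pos]
    have hmid2 : (lo + hi) / 2 < hi := by omega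
    refine ih (by omega) hhl ?_ hhi
    intro k hk
    rcases Nat.lt_or_ge k lo with h1 | h1
    · exact hlo k h1
    · exact lt_of_le_of_lt (sorted_getD hs k ((lo + hi) / 2) (by omega) (by omega)) hc
  | case2 lo hi h mid hc ih =>
    intro hlh hhl hlo hhi
    rw [pvBisect]
    simp only [mid] at hc ih ⊢
    simp only [h, dif_pos, hc, if_neg, not_false_iff]
    have hmid1 : lo ≤ (lo + hi) / 2 := by omega
    have hmid2 : (lo + hi) / 2 < hi := by omega
    refine ih hmid1 (by omega) hlo ?_
    intro k hk hkl
    exact le_trans (not_lt.mp hc) (sorted_getD hs ((lo + hi) / 2) k hk hkl)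
  | case3 lo hi h =>
    intro hlh hhl hlo hhi
    rw [pvBisect]
    simp only [h, dif_neg, not_false_iff]
    exact ⟨by omega, hlo, fun k hk hkl => hhi k (by omega) hkl⟩

-- A's linear scan returns l[i] (or -1) for any i with the first-index-≥-pos property
lemma pvFirstGE_char : ∀ (l : List Int) (pos : Int) (i : Nat),
    i ≤ l.length →
    (∀ k, k < i → l.getD k 0 < pos) →
    (i < l.length → pos ≤ l.getD i 0) →
    pvFirstGE l pos = if i < l.length then l.getD i 0 else -1 := by
  intro l
  induction l with
  | nil => intro pos i hi _ _; simp at hi; simp [hi, pvFirstGE]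
  | cons x xs ihl =>
    intro pos i hi hlt hge
    cases i with
    | zero =>
      have hx : pos ≤ x := hge (by simp)
      simp [pvFirstGE, hx]
    | succ i' =>
      have hx : x < pos := hlt 0 (Nat.succ_pos i')
      have hne : ¬ x ≥ pos := not_le.mpr hx
      simp only [pvFirstGE, hne, if_neg]
      rw [ihl pos i' (by simpa using hi)
        (fun k hk => hlt (k + 1) (by omega))
        (fun h => hge (by simpa using h))]
      simp [Nat.succ_lt_succ_iff]

-- ===== VERDICT (by name: the statement is the Claim_ definition above) =====
theorem FindCharInStringUsingMap_spec : Claim_equal_FindCharInStringUsingMap := by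
  intro myChar mapLocations pos _ hpre
  unfold Spec_FindCharInStringUsingMap FindCharInStringUsingMap FindCharInStringUsingMap_alt
  rw [contains_keys_eq_lookup_isSome]
  cases hlk : List.lookup myChar mapLocations with
  | none => simp
  | some locList =>
    simp only [Option.isSome_some, not_true, if_neg, reduceCtorEq, decide_true, Bool.not_true,
      Bool.false_eq_true, ite_false]
    have hs : locList.Pairwise (· ≤ ·) := by
      unfold Pre_FindCharInStringUsingMap at hpre
      rwa [hlk] at hpre
    obtain ⟨h1, h2, h3⟩ := pvBisect_inv locList pos hs 0 locList.length
      (Nat.zero_le _) (le_refl _) (by omega) (by omega)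
    exact pvFirstGE_char locList pos _ h1 h2 (fun h => h3 _ (le_refl _) h)
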